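-- pv_equiv track=rewrite | github.com/shinde2/UVA | random/RightMost.py | RightMostUnset
-- ===== SOURCE A (Python) =====
-- def RightMostUnset(n, N):
--
--     lst = []
--
--     if n == 0:
--         return [i for i in range(N)]
--     else:
--         pos = 0
--         while N:
--             if not (n & 1):
--                 lst.append(pos)
--             pos += 1
--             n = n >> 1
--             N -= 1
--
--         return lst
-- ===== SOURCE B (Python) =====
-- def RightMostUnset(n, N):
--     mask = ~n & ((1 << N) - 1)
--     lst = []
--     while mask:
--         b = mask & -mask
--         lst.append(b.bit_length() - 1)
--         mask -= b
--     return lst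
-- ===== Notes on version B (the rewrite author's own statement) =====
-- stated objective: alternative
-- what changed: Replaces A's positional scan of all N bit positions (with a special case for n==0) by building the mask ~n & ((1<<N)-1) of unset bits once and iterating only over its set bits with the lowest-set-bit trick b = mask & -mask, reading each position off b.bit_length()-1.
-- outside the precondition, e.g. on RightMostUnset(0, -1): A returns [], B raises ValueError
import Mathlib
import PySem

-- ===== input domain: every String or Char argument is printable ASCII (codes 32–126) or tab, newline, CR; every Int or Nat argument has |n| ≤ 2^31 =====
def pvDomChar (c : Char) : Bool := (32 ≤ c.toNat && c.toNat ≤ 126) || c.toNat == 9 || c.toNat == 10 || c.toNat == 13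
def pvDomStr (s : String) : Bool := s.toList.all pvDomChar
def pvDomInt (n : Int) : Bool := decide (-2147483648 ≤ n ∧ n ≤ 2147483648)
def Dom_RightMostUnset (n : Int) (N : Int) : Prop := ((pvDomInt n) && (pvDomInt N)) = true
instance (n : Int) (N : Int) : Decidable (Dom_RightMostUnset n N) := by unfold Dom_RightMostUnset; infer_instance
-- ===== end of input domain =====

-- B replaces A's positional scan of all N bit positions by a mask of the unset bits
-- iterated with the lowest-set-bit trick (alternative algorithm; return values proved equal on Pre_).

-- ===== PORT A =====
-- the while-loop of A; fuel = N.toNat is exact for N ≥ 0 (Pre_): the loop runs exactly N times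
def pvALoop : Nat → Int → Int → List Int → List Int
  | 0, _, _, lst => lst
  | f+1, n, pos, lst =>
      pvALoop f (Int.shiftRight n 1) (pos + 1) (if Int.land n 1 = 0 then lst ++ [pos] else lst)

def RightMostUnset (n : Int) (N : Int) : List Int :=
  if n = 0 then PySem.List.pyRange 0 N 1
  else pvALoop N.toNat n 0 []

-- ===== PORT B =====
-- Python int.bit_length (exact for every int: bit length of |x|)
def pvBitLength (x : Int) : Int := if x = 0 then 0 else (Nat.log2 x.natAbs : Int) + 1

-- the while-loop of B; fuel = mask.toNat suffices since each iteration lowers mask by b ≥ 1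
def pvBLoop : Nat → Int → List Int → List Int
  | 0, _, lst => lst
  | f+1, mask, lst =>
      if mask = 0 then lst
      else
        let b := Int.land mask (-mask)
        pvBLoop f (mask - b) (lst ++ [pvBitLength b - 1])

def RightMostUnset_alt (n : Int) (N : Int) : List Int :=
  -- mask = ~n & ((1 << N) - 1); the shift 1 << N is 2 ^ N, exact for N ≥ 0 (Pre_)
  let mask := Int.land (Int.not n) ((2 : Int) ^ N.toNat - 1)
  pvBLoop mask.toNat mask []

-- ===== PRECONDITION & SPEC =====
-- Pre_ excludes negative N: there Python A diverges whenever n ≠ 0 and returns [] only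
-- through the n == 0 special case, while B's shift 1 << N raises ValueError.
def Pre_RightMostUnset (n : Int) (N : Int) : Prop := 0 ≤ N
instance (n : Int) (N : Int) : Decidable (Pre_RightMostUnset n N) := by
  unfold Pre_RightMostUnset; infer_instance

def pvWitness_RightMostUnset : Int × Int := (5, 3)

def Spec_RightMostUnset (n : Int) (N : Int) (out : List Int) : Prop := out = RightMostUnset_alt n N
instance (n : Int) (N : Int) (out : List Int) : Decidable (Spec_RightMostUnset n N out) := by
  unfold Spec_RightMostUnset; infer_instance

-- ===== CLAIM (what is proved, stated in full; the proofs are below) =====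
def Claim_equal_RightMostUnset : Prop := ∀ (n : Int) (N : Int), Dom_RightMostUnset n N →
  Pre_RightMostUnset n N → Spec_RightMostUnset n N (RightMostUnset n N)

-- ===== LEMMAS AND PROOFS =====

-- the common target: positions i < K (ascending) whose bit satisfies p
def pvT (p : Nat → Bool) (K : Nat) : List Int :=
  (List.range K).filterMap (fun i => if p i then some (i : Int) else none)

-- set-bit positions of a Nat, by binary recursion
def pvS (m : Nat) : List Int :=
  if h : m = 0 then [] else
    (if m % 2 = 1 then [(0 : Int)] else []) ++ (pvS (m / 2)).map (· + 1)
decreasing_by exact Nat.div_lt_self (Nat.pos_of_ne_zero h) one_lt_two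

theorem pvS_zero : pvS 0 = [] := by rw [pvS]; simp

theorem pvS_pos (m : Nat) (h : m ≠ 0) :
    pvS m = (if m % 2 = 1 then [(0 : Int)] else []) ++ (pvS (m / 2)).map (· + 1) := by
  rw [pvS]; simp [h]

theorem pvFilterMap_congr {α β : Type} (f g : α → Option β) :
    ∀ l : List α, (∀ a ∈ l, f a = g a) → l.filterMap f = l.filterMap g
  | [], _ => rfl
  | a :: l, h => by
      rw [List.filterMap_cons, List.filterMap_cons, h a (by simp),
        pvFilterMap_congr f g l (fun x hx => h x (by simp [hx]))]

theorem pvT_succ (p : Nat → Bool) (K : Nat) :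
    pvT p (K + 1) = (if p 0 then [(0 : Int)] else []) ++ (pvT (fun i => p (i + 1)) K).map (· + 1) := by
  unfold pvT
  rw [List.range_succ_eq_map, List.filterMap_cons, List.filterMap_map]
  cases hp : p 0 <;> simp [hp] <;>
    (rw [List.map_filterMap]; apply pvFilterMap_congr; intro a _;
     by_cases hq : p (a + 1) = true <;> simp [hq])

theorem pvLand_one_eq_zero_iff (n : Int) : Int.land n 1 = 0 ↔ n.testBit 0 = false := by
  cases n with
  | ofNat m =>
      rw [show Int.land (Int.ofNat m) 1 = Int.ofNat (m &&& 1) from rfl, Nat.and_one_is_mod]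
      show (Int.ofNat (m % 2) = 0) ↔ (Nat.testBit m 0 = false)
      rw [Nat.testBit_zero]
      constructor
      · intro h; simp at h; simp; omega
      · intro h; simp at h; simp; omega
  | negSucc m =>
      rw [show Int.land (Int.negSucc m) 1 = Int.ofNat (Nat.ldiff 1 m) from rfl]
      have hld : Nat.ldiff 1 m = if m.testBit 0 then 0 else 1 := by
        apply Nat.eq_of_testBit_eq
        intro i
        rw [Nat.testBit_ldiff]
        cases i with
        | zero =>
            cases hb : m.testBit 0 <;> simp [hb] <;> try decide
        | succ j =>
            have h1 : Nat.testBit 1 (j + 1) = false := by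
              rw [Nat.testBit_succ]; simp
            cases hb : m.testBit 0 <;> simp [hb, h1] <;> try decide
      rw [hld]
      show _ ↔ (!m.testBit 0) = false
      cases hb : m.testBit 0 <;> simp [hb]

theorem pvShiftRight_one_testBit (n : Int) (i : Nat) :
    (Int.shiftRight n 1).testBit i = n.testBit (i + 1) := by
  cases n with
  | ofNat m =>
      show (m >>> 1).testBit i = m.testBit (i + 1)
      rw [Nat.shiftRight_eq_div_pow, pow_one, Nat.testBit_succ]
  | negSucc m =>
      show (!(m >>> 1).testBit i) = (!m.testBit (i + 1))
      rw [Nat.shiftRight_eq_div_pow, pow_one, Nat.testBit_succ]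

theorem pvALoop_eq (f : Nat) : ∀ (n pos : Int) (lst : List Int),
    pvALoop f n pos lst = lst ++ (pvT (fun i => !n.testBit i) f).map (fun x => pos + x) := by
  induction f with
  | zero => intro n pos lst; simp [pvALoop, pvT]
  | succ g IH =>
      intro n pos lst
      show pvALoop g (Int.shiftRight n 1) (pos + 1)
          (if Int.land n 1 = 0 then lst ++ [pos] else lst) = _
      rw [IH, pvT_succ]
      have hp : (fun i => !(Int.shiftRight n 1).testBit i) = (fun i => !n.testBit (i + 1)) := by
        funext i; rw [pvShiftRight_one_testBit]
      rw [hp]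
      have hmap : ((pvT (fun i => !n.testBit (i + 1)) g).map (· + 1)).map (fun x => pos + x)
          = (pvT (fun i => !n.testBit (i + 1)) g).map (fun x => (pos + 1) + x) := by
        rw [List.map_map]; apply List.map_congr_left; intro x _; simp; ring
      by_cases h : Int.land n 1 = 0
      · have hb : n.testBit 0 = false := (pvLand_one_eq_zero_iff n).mp h
        simp [h, hb, hmap]
      · have hb : n.testBit 0 = true := by
          cases hb' : n.testBit 0
          · exact absurd ((pvLand_one_eq_zero_iff n).mpr hb') h
          · rfl
        simp [h, hb, hmap]

-- lowest set bit of a positive Nat, as Int: m & -m = m.ldiff (m-1)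
theorem pvLowbitCast (m : Nat) (h : m ≠ 0) :
    Int.land (m : Int) (-(m : Int)) = ((Nat.ldiff m (m - 1) : Nat) : Int) := by
  obtain ⟨k, rfl⟩ : ∃ k, m = k + 1 := ⟨m - 1, by omega⟩
  show Int.land (Int.ofNat (k + 1)) (-(Int.ofNat (k + 1))) = Int.ofNat (Nat.ldiff (k + 1) (k + 1 - 1))
  rfl

theorem pvLdiff_le (m k : Nat) : Nat.ldiff m k ≤ m := by
  apply Nat.le_of_testBit
  intro i hi
  rw [Nat.testBit_ldiff] at hi
  cases h : Nat.testBit m i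
  · rw [h] at hi; simp at hi
  · rfl

theorem pvLdiff_ne_zero (m : Nat) (h : m ≠ 0) : Nat.ldiff m (m - 1) ≠ 0 := by
  intro h0
  have hle : m ≤ m - 1 := by
    apply Nat.le_of_testBit
    intro i hi
    have := congrArg (fun x => Nat.testBit x i) h0
    simp [Nat.testBit_ldiff, hi] at this
    exact this
  omega

theorem pvLdiff_odd (m : Nat) (h : m % 2 = 1) : Nat.ldiff m (m - 1) = 1 := by
  apply Nat.eq_of_testBit_eq
  intro i
  cases i with
  | zero =>
      have h2 : (m - 1) % 2 = 0 := by omega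
      rw [Nat.testBit_ldiff]
      simp [Nat.testBit_zero, h, h2]
  | succ j =>
      have hd : (m - 1) / 2 = m / 2 := by omega
      have h1 : Nat.testBit 1 (j + 1) = false := by rw [Nat.testBit_succ]; simp
      rw [Nat.testBit_ldiff, Nat.testBit_succ, Nat.testBit_succ, hd, h1]
      cases htb : Nat.testBit (m / 2) j <;> simp [htb]

theorem pvLdiff_even (k : Nat) (hk : k ≠ 0) :
    Nat.ldiff (2 * k) (2 * k - 1) = 2 * Nat.ldiff k (k - 1) := by
  apply Nat.eq_of_testBit_eq
  intro i
  cases i with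
  | zero =>
      have a : (2 * k) % 2 = 0 := by omega
      have b : (2 * Nat.ldiff k (k - 1)) % 2 = 0 := by omega
      rw [Nat.testBit_ldiff]
      simp [Nat.testBit_zero, a, b]
  | succ j =>
      have h1 : (2 * k - 1) / 2 = k - 1 := by omega
      have h2 : (2 * k) / 2 = k := by omega
      have h3 : (2 * Nat.ldiff k (k - 1)) / 2 = Nat.ldiff k (k - 1) := by omega
      rw [Nat.testBit_ldiff, Nat.testBit_succ, Nat.testBit_succ, Nat.testBit_succ, h1, h2, h3,
        Nat.testBit_ldiff]

theorem pvLog2_two_mul (x : Nat) (hx : x ≠ 0) : Nat.log2 (2 * x) = Nat.log2 x + 1 := by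
  rw [Nat.log2_eq_log_two, Nat.log2_eq_log_two, mul_comm]
  exact Nat.log_mul_base (by norm_num) hx

theorem pvBitLength_two_mul (x : Nat) (hx : x ≠ 0) :
    pvBitLength ((2 * x : Nat) : Int) = pvBitLength (x : Int) + 1 := by
  unfold pvBitLength
  have hx2 : ((2 * x : Nat) : Int) ≠ 0 := by
    simp; omega
  have hx1 : ((x : Nat) : Int) ≠ 0 := by simp [hx]
  rw [if_neg hx2, if_neg hx1]
  have ha : ((2 * x : Nat) : Int).natAbs = 2 * x := Int.natAbs_natCast _
  have hb : ((x : Nat) : Int).natAbs = x := Int.natAbs_natCast _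
  rw [ha, hb, pvLog2_two_mul x hx]
  push_cast
  ring

theorem pvS_two_mul (k : Nat) : pvS (2 * k) = (pvS k).map (· + 1) := by
  by_cases hk : k = 0
  · subst hk; simp [pvS_zero]
  · rw [pvS_pos (2 * k) (by omega)]
    have h3 : ¬ ((2 * k) % 2 = 1) := by omega
    have h4 : (2 * k) / 2 = k := by omega
    rw [if_neg h3, h4]
    simp

theorem pvS_step : ∀ m : Nat, m ≠ 0 →
    pvS m = (pvBitLength ((Nat.ldiff m (m - 1) : Nat) : Int) - 1) :: pvS (m - Nat.ldiff m (m - 1)) := by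
  intro m
  induction m using Nat.strong_induction_on with
  | _ m IH =>
    intro hm
    by_cases hodd : m % 2 = 1
    · -- odd: lowest set bit is bit 0
      rw [pvLdiff_odd m hodd]
      have hb1 : pvBitLength ((1 : Nat) : Int) - 1 = 0 := by
        unfold pvBitLength; norm_num
      rw [hb1]
      rw [pvS_pos m hm, if_pos hodd]
      have h1 : m - 1 = 2 * (m / 2) := by omega
      rw [h1, pvS_two_mul]
      simp
    · -- even: m = 2k
      have hev : m % 2 = 0 := by omega
      obtain ⟨k, rfl⟩ : ∃ k, m = 2 * k := ⟨m / 2, by omega⟩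
      have hk : k ≠ 0 := by omega
      have hc' : Nat.ldiff k (k - 1) ≠ 0 := pvLdiff_ne_zero k hk
      have hcle : Nat.ldiff k (k - 1) ≤ k := pvLdiff_le k (k - 1)
      rw [pvLdiff_even k hk]
      rw [pvS_two_mul, IH k (by omega) hk]
      rw [pvBitLength_two_mul _ hc']
      have h2 : 2 * k - 2 * Nat.ldiff k (k - 1) = 2 * (k - Nat.ldiff k (k - 1)) := by omega
      rw [h2, pvS_two_mul]
      simp

theorem pvBLoop_eq : ∀ m fuel : Nat, ∀ lst : List Int, m ≤ fuel →
    pvBLoop fuel (m : Int) lst = lst ++ pvS m := by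
  intro m
  induction m using Nat.strong_induction_on with
  | _ m IH =>
    intro fuel lst hfuel
    by_cases hm : m = 0
    · subst hm
      cases fuel with
      | zero => simp [pvBLoop, pvS_zero]
      | succ f => simp [pvBLoop, pvS_zero]
    · cases fuel with
      | zero => omega
      | succ f =>
          have hne : ((m : Nat) : Int) ≠ 0 := by simp [hm]
          show (if (m : Int) = 0 then lst else
            pvBLoop f ((m : Int) - Int.land (m : Int) (-(m : Int)))
              (lst ++ [pvBitLength (Int.land (m : Int) (-(m : Int))) - 1])) = lst ++ pvS m
          rw [if_neg hne, pvLowbitCast m hm]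
          have hc0 : Nat.ldiff m (m - 1) ≠ 0 := pvLdiff_ne_zero m hm
          have hcle : Nat.ldiff m (m - 1) ≤ m := pvLdiff_le m (m - 1)
          have hsub : (m : Int) - ((Nat.ldiff m (m - 1) : Nat) : Int)
              = ((m - Nat.ldiff m (m - 1) : Nat) : Int) := by
            push_cast [Nat.cast_sub hcle]; ring
          rw [hsub, IH (m - Nat.ldiff m (m - 1)) (by omega) f _ (by omega)]
          rw [pvS_step m hm]
          simp

theorem pvS_eq_pvT : ∀ K m : Nat, m < 2 ^ K → pvS m = pvT (fun i => m.testBit i) K := by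
  intro K
  induction K with
  | zero =>
      intro m hm
      have : m = 0 := by omega
      subst this
      simp [pvS_zero, pvT]
  | succ K IH =>
      intro m hm
      by_cases hm0 : m = 0
      · subst hm0
        simp [pvS_zero, pvT, Nat.zero_testBit]
      · rw [pvT_succ, pvS_pos m hm0]
        have hdiv : m / 2 < 2 ^ K := by
          have : (2 : Nat) ^ (K + 1) = 2 ^ K * 2 := by ring
          rw [this] at hm
          omega
        have hp : (fun i => m.testBit (i + 1)) = (fun i => (m / 2).testBit i) := by
          funext i; rw [Nat.testBit_succ]
        rw [hp, ← IH (m / 2) hdiv]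
        have hb : m.testBit 0 = decide (m % 2 = 1) := Nat.testBit_zero m
        rw [hb]
        by_cases ho : m % 2 = 1 <;> simp [ho]

theorem pvTestBit_not (n : Int) (i : Nat) : (Int.not n).testBit i = !n.testBit i := by
  cases n with
  | ofNat m => simp [Int.not, Int.testBit]
  | negSucc m => simp [Int.not, Int.testBit]

theorem RightMostUnset_spec : Claim_equal_RightMostUnset := by
  unfold Claim_equal_RightMostUnset
  intro n N _ hPre
  unfold Pre_RightMostUnset at hPre
  unfold Spec_RightMostUnset
  set K := N.toNat with hK
  -- B's mask as a natural number
  have hone : 1 ≤ 2 ^ K := Nat.one_le_two_pow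
  have hcast : ((2 : Int) ^ K - 1) = (((2 ^ K - 1 : Nat)) : Int) := by
    push_cast [Nat.cast_sub hone]; ring
  obtain ⟨M, hM⟩ : ∃ M : Nat, Int.land (Int.not n) (((2 ^ K - 1 : Nat) : Int)) = (M : Int) := by
    cases n with
    | ofNat a => exact ⟨Nat.ldiff (2 ^ K - 1) a, rfl⟩
    | negSucc a => exact ⟨a &&& (2 ^ K - 1), rfl⟩
  have hbit : ∀ i : Nat, M.testBit i = (!n.testBit i && decide (i < K)) := by
    intro i
    have h1 : ((M : Int)).testBit i = (Int.land (Int.not n) (((2 ^ K - 1 : Nat) : Int))).testBit i := by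
      rw [hM]
    have h2 : ((M : Int)).testBit i = M.testBit i := rfl
    have h3 : (((2 ^ K - 1 : Nat) : Int)).testBit i = (2 ^ K - 1 : Nat).testBit i := rfl
    rw [h2, Int.testBit_land, pvTestBit_not, h3, Nat.testBit_two_pow_sub_one] at h1
    exact h1
  have hMlt : M < 2 ^ K := by
    have hle : M ≤ 2 ^ K - 1 := by
      apply Nat.le_of_testBit
      intro i hi
      rw [hbit i] at hi
      simp at hi
      rw [Nat.testBit_two_pow_sub_one]
      simpa using hi.2
    omega
  -- B equals the target
  have hB : RightMostUnset_alt n N = pvT (fun i => !n.testBit i) K := by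
    show pvBLoop (Int.land (Int.not n) ((2 : Int) ^ K - 1)).toNat
        (Int.land (Int.not n) ((2 : Int) ^ K - 1)) [] = _
    rw [hcast, hM, Int.toNat_natCast]
    rw [pvBLoop_eq M M [] (le_refl M)]
    rw [pvS_eq_pvT K M hMlt]
    unfold pvT
    apply pvFilterMap_congr
    intro i hi
    rw [List.mem_range] at hi
    simp only [hbit i]
    simp [hi]
  rw [hB]
  -- A equals the target
  unfold RightMostUnset
  by_cases hn : n = 0
  · subst hn
    rw [if_pos rfl, PySem.List.pyRange_one]
    have hz : ∀ i : Nat, (0 : Int).testBit i = false := by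
      intro i
      show Nat.testBit 0 i = false
      exact Nat.zero_testBit i
    unfold pvT
    simp [hz]
    rfl
  · rw [if_neg hn, pvALoop_eq]
    simp
    rfl

-- ===== VERDICT (by name: the statement is the Claim_ definition above) =====
-- (the verdict theorem RightMostUnset_spec is proved directly above)
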